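-- pv_equiv track=rewrite | github.com/cognitedata/cognite-sdk-python | cognite/client/_api/ai/python_schema.py | _find_duplicate_argument_names
-- ===== SOURCE A (Python) =====
-- def _find_duplicate_argument_names(argument_names: list[str]) -> list[str]:
--     seen: set[str] = set()
--     duplicates: list[str] = []
--     for name in argument_names:
--         if name in seen and name not in duplicates:
--             duplicates.append(name)
--         seen.add(name)
--     return duplicates
-- ===== SOURCE B (Python) =====
-- def _find_duplicate_argument_names(argument_names: list[str]) -> list[str]:
--     # A name is a duplicate exactly at its second occurrence: keep the names
--     # whose preceding prefix contains them exactly once.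
--     return [name for i, name in enumerate(argument_names)
--             if argument_names[:i].count(name) == 1]
-- ===== Notes on version B (the rewrite author's own statement) =====
-- stated objective: simpler
-- what changed: Replaces A's stateful loop over a seen-set and a duplicates-list with a stateless one-line comprehension that keeps each name whose preceding prefix contains it exactly once (its second occurrence).
import Mathlib
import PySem

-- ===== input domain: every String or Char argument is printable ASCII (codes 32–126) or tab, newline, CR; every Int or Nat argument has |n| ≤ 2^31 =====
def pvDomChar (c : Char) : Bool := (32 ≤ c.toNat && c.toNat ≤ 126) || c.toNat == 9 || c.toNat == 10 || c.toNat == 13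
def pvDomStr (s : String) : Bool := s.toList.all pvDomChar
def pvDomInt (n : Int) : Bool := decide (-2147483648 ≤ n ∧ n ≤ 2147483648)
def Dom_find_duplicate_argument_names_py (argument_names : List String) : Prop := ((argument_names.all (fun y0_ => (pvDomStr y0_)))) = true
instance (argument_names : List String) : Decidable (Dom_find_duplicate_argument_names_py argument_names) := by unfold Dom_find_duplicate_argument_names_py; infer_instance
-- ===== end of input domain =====

-- B replaces A's stateful seen-set + duplicates-list loop with a stateless
-- comprehension keeping each name whose preceding prefix contains it exactly once (simpler).


-- ===== PORT A =====
def find_duplicate_argument_names_py (argument_names : List String) : List String :=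
  (argument_names.foldl
    (fun (st : PySem.Set String × List String) name =>
      let dups := if PySem.Set.contains st.1 name && !(st.2.contains name)
                  then st.2 ++ [name] else st.2
      (PySem.Set.add st.1 name, dups))
    (PySem.Set.empty, [])).2

-- ===== PORT B =====
-- comprehension [name for i, name in enumerate(xs) if xs[:i].count(name) == 1]
def find_duplicate_argument_names_py_alt (argument_names : List String) : List String :=
  ((PySem.List.enumerate argument_names 0).filter
    (fun p => (PySem.List.slice argument_names none (some p.1)).count p.2 == 1)).map (·.2)

-- ===== PRECONDITION & SPEC =====
def Spec_find_duplicate_argument_names_py (argument_names : List String) (out : List String) : Prop := out = find_duplicate_argument_names_py_alt argument_names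
instance (argument_names : List String) (out : List String) : Decidable (Spec_find_duplicate_argument_names_py argument_names out) := by unfold Spec_find_duplicate_argument_names_py; infer_instance

-- ===== CLAIM (what is proved, stated in full; the proofs are below) =====
def Claim_equal_find_duplicate_argument_names_py : Prop := ∀ (argument_names : List String), Dom_find_duplicate_argument_names_py argument_names → Spec_find_duplicate_argument_names_py argument_names (find_duplicate_argument_names_py argument_names)

-- ===== LEMMAS AND PROOFS =====

-- B on a snoc: the new last element is kept iff the prefix counts it exactly once.
theorem alt_append (p : List String) (a : String) :
    find_duplicate_argument_names_py_alt (p ++ [a]) =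
    find_duplicate_argument_names_py_alt p ++ (if p.count a = 1 then [a] else []) := by
  unfold find_duplicate_argument_names_py_alt
  rw [PySem.List.enumerate_append]
  rw [List.filter_append, List.map_append]
  congr 1
  · congr 1
    apply List.filter_congr
    intro q hq
    obtain ⟨k, hk, rfl⟩ := (PySem.List.mem_enumerate_iff _ _ _).1 hq
    have h0 : ((0 : Int) + k) = ((k : Nat) : Int) := by omega
    rw [h0, PySem.List.slice_to_natCast, PySem.List.slice_to_natCast,
        List.take_append_of_le_length (le_of_lt hk)]
  · have h0 : ((0 : Int) + (p.length : Int)) = ((p.length : Nat) : Int) := by omega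
    rw [PySem.List.enumerate_cons, PySem.List.enumerate_nil, h0]
    simp only [List.filter_cons, List.filter_nil, PySem.List.slice_to_natCast, List.take_left]
    by_cases hc : p.count a = 1
    · simp [hc]
    · simp [hc]

-- Membership in B's result is "occurs at least twice".
theorem mem_alt (p : List String) (a : String) :
    a ∈ find_duplicate_argument_names_py_alt p ↔ 2 ≤ p.count a := by
  induction p using List.reverseRecOn with
  | nil => simp [find_duplicate_argument_names_py_alt, PySem.List.enumerate_nil]
  | append_singleton p b ih =>
    rw [alt_append, List.mem_append, ih, List.count_append]
    by_cases hab : a = b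
    · subst hab
      by_cases hc : p.count a = 1
      · simp [hc]
      · simp [hc]
        rw [← List.count_pos_iff]
        omega
    · have hz : [b].count a = 0 := List.count_eq_zero_of_not_mem (by simp [hab])
      rw [hz]
      by_cases hc : p.count b = 1 <;> simp [hc, hab]

-- Loop invariant: after A processes prefix p, seen-membership is membership in p
-- and the duplicates list is exactly B's answer on p.
theorem fold_eq (xs : List String) (p : List String) (seen : PySem.Set String)
    (dups : List String)
    (hseen : ∀ s, s ∈ seen ↔ s ∈ p)
    (hdups : dups = find_duplicate_argument_names_py_alt p) :
    (xs.foldl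
      (fun (st : PySem.Set String × List String) name =>
        let dups := if PySem.Set.contains st.1 name && !(st.2.contains name)
                    then st.2 ++ [name] else st.2
        (PySem.Set.add st.1 name, dups))
      (seen, dups)).2 = find_duplicate_argument_names_py_alt (p ++ xs) := by
  induction xs generalizing p seen dups with
  | nil => simp only [List.foldl_nil, List.append_nil]; exact hdups
  | cons a rest ih =>
    simp only [List.foldl_cons]
    have hcount1 : a ∈ seen ↔ 1 ≤ p.count a := by
      rw [hseen a]
      exact ⟨fun h => List.count_pos_iff.2 h, fun h => List.count_pos_iff.1 h⟩
    have hcount2 : a ∈ dups ↔ 2 ≤ p.count a := by rw [hdups]; exact mem_alt p a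
    have hcond : (PySem.Set.contains seen a && !(dups.contains a)) = decide (p.count a = 1) := by
      by_cases h1 : a ∈ seen
      · by_cases h2 : a ∈ dups
        · have := hcount2.1 h2
          simp [PySem.Set.contains, h1, h2]; omega
        · have c1 := hcount1.1 h1
          have c2 : ¬ 2 ≤ p.count a := fun h => h2 (hcount2.2 h)
          simp [PySem.Set.contains, h1, h2]; omega
      · have c0 : ¬ 1 ≤ p.count a := fun h => h1 (hcount1.2 h)
        have h2 : a ∉ dups := fun h => c0 (by have := hcount2.1 h; omega)
        simp [PySem.Set.contains, h1, h2]; omega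
    rw [hcond]
    have hnext : (if decide (p.count a = 1) = true then dups ++ [a] else dups)
        = find_duplicate_argument_names_py_alt (p ++ [a]) := by
      rw [alt_append, hdups]
      by_cases hc : p.count a = 1 <;> simp [hc]
    have hassoc : p ++ a :: rest = (p ++ [a]) ++ rest := by simp
    rw [hassoc]
    exact ih (p ++ [a]) (PySem.Set.add seen a) _
      (by
        intro s
        rw [PySem.Set.mem_add, List.mem_append, List.mem_singleton, hseen s])
      hnext

-- ===== VERDICT (by name: the statement is the Claim_ definition above) =====
theorem find_duplicate_argument_names_py_spec : Claim_equal_find_duplicate_argument_names_py := by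
  intro xs _
  unfold Spec_find_duplicate_argument_names_py find_duplicate_argument_names_py
  have h := fold_eq xs [] PySem.Set.empty []
    (by intro s; simp [PySem.Set.empty]) (by rfl)
  simpa using h
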